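-- pv_equiv track=rewrite | github.com/Spring302/TIL_github | python/1.study/1.programmers/p2.py | solution
-- ===== SOURCE A (Python) =====
-- def solution(bricks, n, k):
--     select = selectBricks(bricks[1:-1], k-1)
--     min_bricks = n*k-1
--     for arr in select:
--         temp = n*(k-1) - sum(arr)
--         if min_bricks > temp:
--             min_bricks = temp
--     return min_bricks
--
-- def selectBricks(bricks, toPick):
--     result = []
--     if toPick == 0: return [[]]
--     for i in range(len(bricks)):
--         pick = bricks[i]
--         for rest in selectBricks(bricks[i+2:], toPick-1):
--             result.append([pick]+rest)
--     return result
-- ===== SOURCE B (Python) =====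
-- def solution(bricks, n, k):
--     # DP over the inner bricks (right-to-left): best[j] = max sum of j pairwise
--     # non-adjacent bricks in the current suffix, or None if impossible.
--     inner = bricks[1:-1]
--     m = k - 1
--     base = n * k - 1
--     if m < 0 or 2 * m > len(inner) + 1:
--         # fewer than 0 picks never happens; more than ceil(len/2) non-adjacent picks is impossible
--         return base
--     empty = [0] + [None] * m
--     r1, r2 = empty, empty  # rows for the suffixes starting at i+1 and i+2
--     for x in reversed(inner):
--         cur = [0] + [pick(a, b, x) for a, b in zip(r1[1:], r2)]
--         r1, r2 = cur, r1
--     v = r1[m]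
--     if v is None:
--         return base
--     return min(base, n * m - v)
--
-- def pick(a, b, x):
--     # best of: skip x (a), or take x on top of b picks two positions further right
--     if b is None:
--         return a
--     if a is None:
--         return b + x
--     return max(a, b + x)
-- ===== Notes on version B (the rewrite author's own statement) =====
-- stated objective: faster
-- what changed: A enumerates every selection of k-1 pairwise non-adjacent inner bricks recursively and minimises over them; B computes the same answer with a dynamic program over suffixes (max achievable sum for each pick count, None if impossible), intended as asymptotically faster: the probe measured A timing out from n=64 up where B still returned, and B 5.8x faster at the largest size both finished.
import Mathlib
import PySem

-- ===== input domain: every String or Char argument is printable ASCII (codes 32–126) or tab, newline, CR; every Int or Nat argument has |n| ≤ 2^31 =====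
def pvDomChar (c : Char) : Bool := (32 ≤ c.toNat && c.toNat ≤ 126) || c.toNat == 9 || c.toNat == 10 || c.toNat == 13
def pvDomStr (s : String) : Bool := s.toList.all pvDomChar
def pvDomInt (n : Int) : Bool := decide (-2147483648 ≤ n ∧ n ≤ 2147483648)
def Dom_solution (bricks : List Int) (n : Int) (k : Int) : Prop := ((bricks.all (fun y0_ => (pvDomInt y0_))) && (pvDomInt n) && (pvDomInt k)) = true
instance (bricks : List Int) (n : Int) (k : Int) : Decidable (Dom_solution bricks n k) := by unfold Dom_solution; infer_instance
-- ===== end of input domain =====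

-- B replaces A's exponential enumeration of all (k-1)-subsets of pairwise non-adjacent bricks
-- by a dynamic program over suffixes (max sum of j non-adjacent picks, None = impossible).

-- ===== PORT A =====
-- selectBricks: 'if toPick == 0: return [[]]; for i in range(len(bricks)): for rest in
-- selectBricks(bricks[i+2:], toPick-1): result.append([pick]+rest)'.
-- bricks[i] with i ∈ range(len(bricks)) never raises, ported as getD; bricks[i+2:] with i+2 ≥ 0 is List.drop (i+2).
def selectBricks (bricks : List Int) (toPick : Int) : List (List Int) :=
  if toPick = 0 then [[]]
  else
    (List.range bricks.length).attach.foldl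
      (fun result i =>
        result ++ (selectBricks (List.drop (i.1 + 2) bricks) (toPick - 1)).map
          (fun rest => bricks.getD i.1 0 :: rest))
      []
termination_by bricks.length
decreasing_by
  have hi : i.1 < bricks.length := List.mem_range.mp i.2
  simp only [List.length_drop]; omega

def solution (bricks : List Int) (n : Int) (k : Int) : Int :=
  let select := selectBricks (PySem.List.slice bricks (some 1) (some (-1))) (k - 1)
  let min_bricks := n * k - 1
  select.foldl
    (fun mb arr =>
      let temp := n * (k - 1) - arr.sum
      if mb > temp then temp else mb)
    min_bricks

-- ===== PORT B =====
def pick (a b : Option Int) (x : Int) : Option Int :=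
  match b with
  | none => a
  | some b =>
    match a with
    | none => some (b + x)
    | some a => some (max a (b + x))

-- r1[1:] is List.drop 1; r1[m] with 0 ≤ m < len(r1) (rows keep length m+1) is getD.
def solution_alt (bricks : List Int) (n : Int) (k : Int) : Int :=
  let inner := PySem.List.slice bricks (some 1) (some (-1))
  let m := k - 1
  let base := n * k - 1
  -- more than ceil(len/2) pairwise non-adjacent picks is impossible
  if m < 0 ∨ 2 * m > (inner.length : Int) + 1 then base
  else
    let mn := m.toNat
    let empty : List (Option Int) := some 0 :: List.replicate mn none
    let p := inner.reverse.foldl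
      (fun (p : List (Option Int) × List (Option Int)) x =>
        let cur := some 0 :: List.zipWith (fun a b => pick a b x) (p.1.drop 1) p.2
        (cur, p.1))
      (empty, empty)
    match p.1.getD mn none with
    | none => base
    | some v => min base (n * m - v)

-- ===== PRECONDITION & SPEC =====
def Spec_solution (bricks : List Int) (n : Int) (k : Int) (out : Int) : Prop := out = solution_alt bricks n k
instance (bricks : List Int) (n : Int) (k : Int) (out : Int) : Decidable (Spec_solution bricks n k out) := by unfold Spec_solution; infer_instance

-- ===== CLAIM (what is proved, stated in full; the proofs are below) =====
def Claim_equal_solution : Prop := ∀ (bricks : List Int) (n : Int) (k : Int), Dom_solution bricks n k → Spec_solution bricks n k (solution bricks n k)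

-- ===== LEMMAS AND PROOFS =====

-- R L j : the max sum of j pairwise non-adjacent elements of L (none = impossible),
-- i.e. the value B's DP row j holds for the suffix L.
def R : List Int → Nat → Option Int
  | _, 0 => some 0
  | [], _ + 1 => none
  | x :: xs, j + 1 => pick (R xs (j + 1)) (R (xs.drop 1) j) x
termination_by L _ => L.length
decreasing_by all_goals (simp only [List.length_drop, List.length_cons]; omega)

theorem R_zero (L : List Int) : R L 0 = some 0 := by
  cases L <;> rw [R]

theorem R_nil_succ (j : Nat) : R [] (j + 1) = none := by rw [R]

theorem R_cons_succ (x : Int) (xs : List Int) (j : Nat) :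
    R (x :: xs) (j + 1) = pick (R xs (j + 1)) (R (xs.drop 1) j) x := by rw [R]

-- running max (none on the empty list) of f over a list of selections
def omax : Option Int → Option Int → Option Int
  | none, b => b
  | some a, none => some a
  | some a, some b => some (max a b)

def omaxf (f : List Int → Int) : List (List Int) → Option Int
  | [] => none
  | arr :: rest =>
    match omaxf f rest with
    | none => some (f arr)
    | some s => some (max (f arr) s)

theorem omaxf_cons (f : List Int → Int) (a : List Int) (l : List (List Int)) :
    omaxf f (a :: l) = omax (some (f a)) (omaxf f l) := by
  cases h : omaxf f l <;> simp [omaxf, omax, h]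

theorem omax_assoc (a b c : Option Int) : omax (omax a b) c = omax a (omax b c) := by
  cases a <;> cases b <;> cases c <;> simp [omax, max_assoc]

theorem omaxf_append (f : List Int → Int) (l1 l2 : List (List Int)) :
    omaxf f (l1 ++ l2) = omax (omaxf f l1) (omaxf f l2) := by
  induction l1 with
  | nil => simp [omaxf, omax]
  | cons a l1 IH => simp [omaxf_cons, IH, omax_assoc]

theorem omaxf_map_cons (f : List Int → Int) (hf : ∀ x l, f (x :: l) = x + f l)
    (x : Int) (l : List (List Int)) :
    omaxf f (l.map (fun rest => x :: rest)) = (omaxf f l).map (fun s => x + s) := by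
  induction l with
  | nil => simp [omaxf]
  | cons a l IH =>
    cases h : omaxf f l <;>
      (simp [omaxf_cons, IH, h, omax, hf, max_def]; try (split_ifs <;> omega))

theorem flatMap_attach_range {α : Type} (n : Nat) (g : Nat → List α) :
    (List.range n).attach.flatMap (fun i => g i.1) = (List.range n).flatMap g := by
  conv_rhs => rw [← List.attach_map_subtype_val (List.range n), List.flatMap_map]

theorem selB_flatMap (L : List Int) (t : Int) (ht : t ≠ 0) :
    selectBricks L t = (List.range L.length).flatMap
      (fun i => (selectBricks (L.drop (i + 2)) (t - 1)).map (fun rest => L.getD i 0 :: rest)) := by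
  rw [selectBricks, if_neg ht, PySem.List.foldl_append_eq_flatMap, List.nil_append]
  exact flatMap_attach_range L.length
    (fun i => (selectBricks (List.drop (i + 2) L) (t - 1)).map (fun rest => L.getD i 0 :: rest))

theorem selB_zero (L : List Int) : selectBricks L 0 = [[]] := by
  rw [selectBricks]; simp

theorem selB_nil (t : Int) (ht : t ≠ 0) : selectBricks [] t = [] := by
  rw [selB_flatMap [] t ht]
  simp

theorem selB_cons (x : Int) (xs : List Int) (t : Int) (ht : t ≠ 0) :
    selectBricks (x :: xs) t =
      ((selectBricks (xs.drop 1) (t - 1)).map (fun rest => x :: rest)) ++ selectBricks xs t := by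
  rw [selB_flatMap (x :: xs) t ht, selB_flatMap xs t ht]
  rw [List.length_cons, List.range_succ_eq_map, List.flatMap_cons, List.flatMap_map]
  simp

theorem selB_neg : ∀ (N : Nat) (L : List Int), L.length ≤ N → ∀ (t : Int), t < 0 →
    selectBricks L t = [] := by
  intro N
  induction N with
  | zero =>
    intro L hL t ht
    have : L = [] := List.length_eq_zero_iff.mp (Nat.le_zero.mp hL)
    subst this; exact selB_nil t (by omega)
  | succ N IH =>
    intro L hL t ht
    rw [selB_flatMap L t (by omega)]
    apply List.flatMap_eq_nil_iff.mpr
    intro i hi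
    rw [IH (L.drop (i + 2)) (by simp only [List.length_drop]; omega) (t - 1) (by omega)]
    simp

-- more than ceil(len/2) pairwise non-adjacent picks is impossible: the DP value is none
theorem R_none_of_big : ∀ (N : Nat) (L : List Int), L.length ≤ N → ∀ (j : Nat),
    2 * j > L.length + 1 → R L j = none := by
  intro N
  induction N with
  | zero =>
    intro L hL j hj
    have : L = [] := List.length_eq_zero_iff.mp (Nat.le_zero.mp hL)
    subst this
    cases j with
    | zero => omega
    | succ j => exact R_nil_succ j
  | succ N IH =>
    intro L hL j hj
    cases j with
    | zero => omega
    | succ j =>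
      cases L with
      | nil => exact R_nil_succ j
      | cons x xs =>
        rw [R_cons_succ]
        have h1 : xs.length ≤ N := by simp at hL; omega
        rw [IH xs h1 (j + 1) (by simp at hj ⊢; omega),
          IH (xs.drop 1) (by simp only [List.length_drop]; omega) j
            (by simp only [List.length_drop]; simp at hj; omega)]
        rfl

-- the max of f over A's selections is the DP value R, for any sum-like f
theorem R_eq_omaxf (f : List Int → Int) (h0 : f [] = 0) (hf : ∀ x l, f (x :: l) = x + f l) :
    ∀ (N : Nat) (L : List Int), L.length ≤ N → ∀ (j : Nat),
    omaxf f (selectBricks L ((j : Nat) : Int)) = R L j := by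
  intro N
  induction N with
  | zero =>
    intro L hL j
    have : L = [] := List.length_eq_zero_iff.mp (Nat.le_zero.mp hL)
    subst this
    cases j with
    | zero => simp [selB_zero, omaxf, h0, R_zero]
    | succ j =>
      rw [selB_nil _ (by exact_mod_cast Nat.succ_ne_zero j), R_nil_succ]
      rfl
  | succ N IH =>
    intro L hL j
    cases j with
    | zero => simp [selB_zero, omaxf, h0, R_zero]
    | succ j =>
      cases L with
      | nil =>
        rw [selB_nil _ (by exact_mod_cast Nat.succ_ne_zero j), R_nil_succ]
        rfl
      | cons x xs =>
        rw [selB_cons x xs _ (by exact_mod_cast Nat.succ_ne_zero j)]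
        have hc : (((j + 1 : Nat) : Int)) - 1 = ((j : Nat) : Int) := by push_cast; ring
        rw [hc, omaxf_append, omaxf_map_cons f hf]
        have h1 : xs.length ≤ N := by simp at hL; omega
        rw [IH (xs.drop 1) (by simp only [List.length_drop]; omega) j, IH xs h1 (j + 1),
          R_cons_succ]
        cases hA : R xs (j + 1) <;> cases hB : R (xs.drop 1) j <;>
          simp [omax, pick, max_def] <;> (try split_ifs) <;> omega

-- A's running-minimum loop computes min(c, C - max f) over the selections.
def clip (C c : Int) : Option Int → Int
  | none => c
  | some s => min c (C - s)

theorem foldl_min (C : Int) (f : List Int → Int) : ∀ (sel : List (List Int)) (c : Int),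
    sel.foldl (fun mb arr => if mb > C - f arr then C - f arr else mb) c
      = clip C c (omaxf f sel) := by
  intro sel
  induction sel with
  | nil => intro c; rfl
  | cons a sel IH =>
    intro c
    rw [List.foldl_cons, IH, omaxf_cons]
    cases h : omaxf f sel <;> simp [omax, clip] <;> omega

-- ===== B side: the DP rows are vectors of R values =====
def vec (L : List Int) (mn : Nat) : List (Option Int) :=
  (List.range (mn + 1)).map (fun j => R L j)

theorem vec_nil (mn : Nat) : vec [] mn = some 0 :: List.replicate mn none := by
  rw [vec, List.range_succ_eq_map, List.map_cons, List.map_map, R_zero]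
  congr 1
  rw [show (fun j => R [] j) ∘ Nat.succ = fun _ => (none : Option Int) from
    funext (fun j => R_nil_succ j)]
  simp [List.map_const']

theorem zipWith_map_range {α β γ : Type} (f : α → β → γ) (g1 : Nat → α) (g2 : Nat → β)
    (l r : List Nat) :
    List.zipWith f (l.map g1) ((l ++ r).map g2) = l.map (fun j => f (g1 j) (g2 j)) := by
  induction l with
  | nil => simp
  | cons a l IH =>
    simp only [List.map_cons, List.cons_append, List.zipWith_cons_cons]
    rw [IH]

theorem vec_drop_one (L : List Int) (mn : Nat) :
    (vec L mn).drop 1 = (List.range mn).map (fun j => R L (j + 1)) := by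
  rw [vec, List.range_succ_eq_map, List.map_cons, List.drop_one, List.tail_cons, List.map_map]
  rfl

theorem step_vec (x : Int) (xs : List Int) (mn : Nat) :
    (some 0 :: List.zipWith (fun a b => pick a b x) ((vec xs mn).drop 1) (vec (xs.drop 1) mn))
      = vec (x :: xs) mn := by
  rw [vec_drop_one]
  rw [show vec (xs.drop 1) mn = (List.range mn ++ [mn]).map (fun j => R (xs.drop 1) j) from by
    rw [vec, List.range_succ]]
  rw [zipWith_map_range]
  rw [vec, List.range_succ_eq_map, List.map_cons, R_zero, List.map_map]
  congr 1
  apply List.map_congr_left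
  intro j _
  simp only [Function.comp_apply]
  rw [R_cons_succ]

theorem foldl_vec (mn : Nat) : ∀ (L : List Int),
    L.reverse.foldl
      (fun (p : List (Option Int) × List (Option Int)) x =>
        (some 0 :: List.zipWith (fun a b => pick a b x) (p.1.drop 1) p.2, p.1))
      (some 0 :: List.replicate mn none, some 0 :: List.replicate mn none)
      = (vec L mn, vec (L.drop 1) mn) := by
  intro L
  rw [List.foldl_reverse]
  induction L with
  | nil => simp [vec_nil]
  | cons x xs IH =>
    rw [List.foldr_cons, IH, step_vec]
    rfl

theorem vec_getD (L : List Int) (mn : Nat) : (vec L mn).getD mn none = R L mn := by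
  simp [vec, List.getD]

-- ===== VERDICT (by name: the statement is the Claim_ definition above) =====
theorem solution_spec : Claim_equal_solution := by
  intro bricks n k _
  show solution bricks n k = solution_alt bricks n k
  rw [solution, solution_alt]
  dsimp only
  set inner := PySem.List.slice bricks (some 1) (some (-1)) with hinner
  by_cases hk : k - 1 < 0
  · rw [if_pos (Or.inl hk), selB_neg inner.length _ le_rfl _ hk]
    rfl
  · -- k - 1 ≥ 0: A's fold is min(base, n*(k-1) - maxsum) with maxsum = R inner (k-1)
    have hcast : ((k - 1).toNat : Int) = k - 1 := Int.toNat_of_nonneg (by omega)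
    have hsum0 : (fun arr : List Int => arr.sum) [] = 0 := by simp
    have hsumc : ∀ (x : Int) (l : List Int),
        (fun arr : List Int => arr.sum) (x :: l) = x + (fun arr : List Int => arr.sum) l := by
      simp
    have hA := foldl_min (n * (k - 1)) (fun arr : List Int => arr.sum)
      (selectBricks inner (k - 1)) (n * k - 1)
    rw [show selectBricks inner (k - 1) = selectBricks inner (((k - 1).toNat : Nat) : Int) from by
      rw [hcast]] at hA
    rw [R_eq_omaxf (fun arr : List Int => arr.sum) hsum0 hsumc inner.length inner le_rfl
      (k - 1).toNat] at hA
    rw [hcast] at hA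
    by_cases hbig : 2 * (k - 1) > (inner.length : Int) + 1
    · rw [if_pos (Or.inr hbig), hA,
        R_none_of_big inner.length inner le_rfl (k - 1).toNat (by omega)]
      rfl
    · rw [if_neg (by omega)]
      rw [foldl_vec (k - 1).toNat inner, vec_getD, hA]
      cases h : R inner (k - 1).toNat with
      | none => rfl
      | some s => simp [clip]
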